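-- pv_equiv track=rewrite | github.com/s1Sharp/VScode | solve_4.py | MadMax
-- ===== SOURCE A (Python) =====
-- def MadMax(N, tele):
--     my_list = [0]*N
--     middle_of_list = int((N-1)/2)
--
--     for j in range(0,middle_of_list):
--         local_min = tele[j]
--         for i in range(j,N):
--             if tele[i] < local_min:
--                 local_min = tele[i]
--                 tele[j],tele[i]= tele[i], tele[j]
--         my_list[j] = local_min
--     for j in range(middle_of_list,N):
--         local_max = tele[j]
--         for i in range(j,N):
--             if tele[i] > local_max:
--                 local_max = tele[i]
--                 tele[j],tele[i]= tele[i], tele[j]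
--         my_list[j] = local_max
--     return my_list
-- ===== SOURCE B (Python) =====
-- def MadMax(N, tele):
--     if N <= 0:
--         return []
--     middle = (N - 1) // 2
--     s = sorted(tele[:N])
--     return s[:middle] + s[middle:][::-1]
-- ===== Notes on version B (the rewrite author's own statement) =====
-- stated objective: faster
-- what changed: A runs two in-place quadratic selection passes (repeated min-scans with swaps, then max-scans); B sorts the first N elements once with the library sort and assembles the answer as sorted[:middle] + reversed(sorted[middle:]).
import Mathlib
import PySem

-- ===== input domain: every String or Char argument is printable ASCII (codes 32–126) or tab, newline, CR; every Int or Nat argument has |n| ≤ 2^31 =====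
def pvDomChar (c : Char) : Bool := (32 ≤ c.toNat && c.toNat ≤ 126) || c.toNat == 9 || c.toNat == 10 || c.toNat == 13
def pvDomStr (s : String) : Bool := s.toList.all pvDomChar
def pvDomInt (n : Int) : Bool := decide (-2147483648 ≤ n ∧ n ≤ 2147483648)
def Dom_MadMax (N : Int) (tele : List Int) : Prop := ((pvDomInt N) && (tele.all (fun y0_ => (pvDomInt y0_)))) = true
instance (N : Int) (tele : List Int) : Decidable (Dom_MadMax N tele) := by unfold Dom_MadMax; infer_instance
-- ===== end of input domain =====

-- B replaces A's two quadratic in-place selection passes by one library sort of the first N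
-- elements (objective: faster). Python A mutates `tele` in place; the equivalence proved here
-- is about the RETURN value only.

-- ===== PORT A =====
-- inner body of A's first loop: if tele[i] < local_min: local_min = tele[i]; tele[j],tele[i] = tele[i],tele[j]
def pvMinStep (j : Int) (st : Int × List Int) (i : Int) : Int × List Int :=
  if PySem.List.pyGetD st.2 i 0 < st.1 then
    (PySem.List.pyGetD st.2 i 0,
     PySem.List.pySetD (PySem.List.pySetD st.2 j (PySem.List.pyGetD st.2 i 0)) i
       (PySem.List.pyGetD st.2 j 0))
  else st

-- inner body of A's second loop (condition tele[i] > local_max)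
def pvMaxStep (j : Int) (st : Int × List Int) (i : Int) : Int × List Int :=
  if PySem.List.pyGetD st.2 i 0 > st.1 then
    (PySem.List.pyGetD st.2 i 0,
     PySem.List.pySetD (PySem.List.pySetD st.2 j (PySem.List.pyGetD st.2 i 0)) i
       (PySem.List.pyGetD st.2 j 0))
  else st

-- one iteration of A's first outer loop: local_min = tele[j]; inner loop; my_list[j] = local_min
def pvOuterMin (N : Int) (st : List Int × List Int) (j : Int) : List Int × List Int :=
  let r := (PySem.List.pyRange j N 1).foldl (pvMinStep j) (PySem.List.pyGetD st.2 j 0, st.2)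
  (PySem.List.pySetD st.1 j r.1, r.2)

-- one iteration of A's second outer loop
def pvOuterMax (N : Int) (st : List Int × List Int) (j : Int) : List Int × List Int :=
  let r := (PySem.List.pyRange j N 1).foldl (pvMaxStep j) (PySem.List.pyGetD st.2 j 0, st.2)
  (PySem.List.pySetD st.1 j r.1, r.2)

def MadMax (N : Int) (tele : List Int) : List Int :=
  let myList := List.replicate N.toNat (0 : Int)      -- [0]*N  (empty for N ≤ 0, as in Python)
  let middle := PySem.Int.truncdiv (N - 1) 2          -- int((N-1)/2): exact truncating division on Dom
  let st1 := (PySem.List.pyRange 0 middle 1).foldl (pvOuterMin N) (myList, tele)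
  ((PySem.List.pyRange middle N 1).foldl (pvOuterMax N) st1).1

-- ===== PORT B =====
def MadMax_alt (N : Int) (tele : List Int) : List Int :=
  if N ≤ 0 then []
  else
    let middle := PySem.Int.floordiv (N - 1) 2
    let s := PySem.List.sorted (PySem.List.slice tele none (some N)) (fun x => x) false
    PySem.List.slice s none (some middle) ++
      ((PySem.List.slice? (PySem.List.slice s (some middle) none) none none (-1)).getD [])

-- ===== PRECONDITION & SPEC =====
-- Pre_ excludes exactly the inputs where A raises IndexError: 0 < N and N > len(tele).
def Pre_MadMax (N : Int) (tele : List Int) : Prop := N ≤ (tele.length : Int) ∨ N ≤ 0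
instance (N : Int) (tele : List Int) : Decidable (Pre_MadMax N tele) := by
  unfold Pre_MadMax; infer_instance
def pvWitness_MadMax : Int × List Int := (3, [2, 1, 3])

def Spec_MadMax (N : Int) (tele : List Int) (out : List Int) : Prop := out = MadMax_alt N tele
instance (N : Int) (tele : List Int) (out : List Int) : Decidable (Spec_MadMax N tele out) := by
  unfold Spec_MadMax; infer_instance

-- ===== CLAIM (what is proved, stated in full; the proofs are below) =====
def Claim_equal_MadMax : Prop := ∀ (N : Int) (tele : List Int), Dom_MadMax N tele → Pre_MadMax N tele → Spec_MadMax N tele (MadMax N tele)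

-- ===== LEMMAS AND PROOFS =====
def pvStep (cmp : Int → Int → Bool) (j : Int) (st : Int × List Int) (i : Int) : Int × List Int :=
  if cmp (PySem.List.pyGetD st.2 i 0) st.1 then
    (PySem.List.pyGetD st.2 i 0,
     PySem.List.pySetD (PySem.List.pySetD st.2 j (PySem.List.pyGetD st.2 i 0)) i
       (PySem.List.pyGetD st.2 j 0))
  else st
def selR (cmp : Int → Int → Bool) : Int → List Int → Int × List Int
  | lm, [] => (lm, [])
  | lm, x :: xs =>
    if cmp x lm then ((selR cmp x xs).1, lm :: (selR cmp x xs).2)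
    else ((selR cmp lm xs).1, x :: (selR cmp lm xs).2)
theorem pyGetD_at (pre : List Int) (a : Int) (rest : List Int) :
    PySem.List.pyGetD (pre ++ a :: rest) ((pre.length : Nat) : Int) 0 = a := by
  simp [PySem.List.pyGetD_natCast, List.getD]
theorem pySetD_at (pre : List Int) (a : Int) (rest : List Int) (v : Int) :
    PySem.List.pySetD (pre ++ a :: rest) ((pre.length : Nat) : Int) v = pre ++ v :: rest := by
  simp [PySem.List.pySetD_natCast]

theorem innerBridge (cmp : Int → Int → Bool) (seg : List Int) :
    ∀ (mid tp ts : List Int) (lm : Int),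
    (PySem.List.pyRange ((tp.length + 1 + mid.length : Nat) : Int)
        ((tp.length + 1 + mid.length + seg.length : Nat) : Int) 1).foldl
        (pvStep cmp ((tp.length : Nat) : Int)) (lm, tp ++ lm :: (mid ++ (seg ++ ts)))
    = ((selR cmp lm seg).1,
       tp ++ (selR cmp lm seg).1 :: (mid ++ ((selR cmp lm seg).2 ++ ts))) := by
  induction seg with
  | nil =>
    intro mid tp ts lm
    rw [PySem.List.pyRange_one_eq_nil (by simp)]
    simp [selR]
  | cons x xs ih =>
    intro mid tp ts lm
    rw [PySem.List.pyRange_one_cons (by push_cast [List.length_cons]; omega)]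
    rw [List.foldl_cons]
    have hpre : tp ++ lm :: (mid ++ ((x :: xs) ++ ts)) = (tp ++ lm :: mid) ++ x :: (xs ++ ts) := by
      simp
    have hstep : pvStep cmp ((tp.length : Nat) : Int) (lm, tp ++ lm :: (mid ++ ((x :: xs) ++ ts)))
        ((tp.length + 1 + mid.length : Nat) : Int)
        = if cmp x lm then (x, tp ++ x :: ((mid ++ [lm]) ++ (xs ++ ts)))
          else (lm, tp ++ lm :: ((mid ++ [x]) ++ (xs ++ ts))) := by
      have hg : PySem.List.pyGetD (tp ++ lm :: (mid ++ ((x :: xs) ++ ts)))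
          ((tp.length + 1 + mid.length : Nat) : Int) 0 = x := by
        rw [hpre]
        have : (tp.length + 1 + mid.length : Nat) = (tp ++ lm :: mid).length := by simp; omega
        rw [this, pyGetD_at]
      simp only [pvStep]
      rw [hg]
      by_cases hc : cmp x lm
      · rw [if_pos hc, if_pos hc]
        have hgj : PySem.List.pyGetD (tp ++ lm :: (mid ++ ((x :: xs) ++ ts)))
            ((tp.length : Nat) : Int) 0 = lm := pyGetD_at tp lm _
        rw [hgj]
        have hs1 : PySem.List.pySetD (tp ++ lm :: (mid ++ ((x :: xs) ++ ts)))
            ((tp.length : Nat) : Int) x = (tp ++ x :: mid) ++ x :: (xs ++ ts) := by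
          rw [pySetD_at]; simp
        rw [hs1]
        have : (tp.length + 1 + mid.length : Nat) = (tp ++ x :: mid).length := by simp; omega
        rw [this, pySetD_at]
        simp
      · rw [if_neg hc, if_neg hc]
        simp
    rw [hstep]
    by_cases hc : cmp x lm
    · rw [if_pos hc]
      have h1 : ((tp.length + 1 + mid.length : Nat) : Int) + 1
          = ((tp.length + 1 + (mid ++ [lm]).length : Nat) : Int) := by push_cast; simp; omega
      have h2 : ((tp.length + 1 + mid.length + (x :: xs).length : Nat) : Int)
          = ((tp.length + 1 + (mid ++ [lm]).length + xs.length : Nat) : Int) := by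
        push_cast; simp; omega
      rw [h1, h2, ih (mid ++ [lm]) tp ts x]
      simp [selR, hc]
    · rw [if_neg hc]
      have h1 : ((tp.length + 1 + mid.length : Nat) : Int) + 1
          = ((tp.length + 1 + (mid ++ [x]).length : Nat) : Int) := by push_cast; simp; omega
      have h2 : ((tp.length + 1 + mid.length + (x :: xs).length : Nat) : Int)
          = ((tp.length + 1 + (mid ++ [x]).length + xs.length : Nat) : Int) := by
        push_cast; simp; omega
      rw [h1, h2, ih (mid ++ [x]) tp ts lm]
      simp [selR, hc]

def pvOuter (cmp : Int → Int → Bool) (N : Int) (st : List Int × List Int) (j : Int) :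
    List Int × List Int :=
  let r := (PySem.List.pyRange j N 1).foldl (pvStep cmp j) (PySem.List.pyGetD st.2 j 0, st.2)
  (PySem.List.pySetD st.1 j r.1, r.2)

def selLoop (cmp : Int → Int → Bool) : Nat → List Int → List Int × List Int
  | 0, t => ([], t)
  | _ + 1, [] => ([], [])
  | k + 1, x :: xs => ((selR cmp x xs).1 :: (selLoop cmp k (selR cmp x xs).2).1,
                       (selLoop cmp k (selR cmp x xs).2).2)

theorem selR_length (cmp : Int → Int → Bool) (lm : Int) (xs : List Int) :
    (selR cmp lm xs).2.length = xs.length := by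
  induction xs generalizing lm with
  | nil => simp [selR]
  | cons x xs ih => by_cases h : cmp x lm <;> simp [selR, h, ih]

theorem outerBridge (cmp : Int → Int → Bool) (hcmp : ∀ a, cmp a a = false) (N : Int) :
    ∀ (k : Nat) (rest ts tp mdone mrest : List Int),
    mdone.length = tp.length → k ≤ rest.length → k ≤ mrest.length →
    N = ((tp.length + rest.length : Nat) : Int) →
    (PySem.List.pyRange ((tp.length : Nat) : Int) ((tp.length + k : Nat) : Int) 1).foldl
        (pvOuter cmp N) (mdone ++ mrest, tp ++ (rest ++ ts))
    = (mdone ++ ((selLoop cmp k rest).1 ++ mrest.drop k),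
       tp ++ ((selLoop cmp k rest).1 ++ ((selLoop cmp k rest).2 ++ ts))) := by
  intro k
  induction k with
  | zero =>
    intro rest ts tp mdone mrest hlen hk1 hk2 hN
    rw [PySem.List.pyRange_one_eq_nil (by simp)]
    simp [selLoop]
  | succ k ih =>
    intro rest ts tp mdone mrest hlen hk1 hk2 hN
    match rest, hk1 with
    | x :: xs, hk1 =>
    match mrest, hk2 with
    | z :: zr, hk2 =>
      simp only [List.length_cons] at hk1 hk2
      rw [PySem.List.pyRange_one_cons (by push_cast; omega)]
      rw [List.foldl_cons]
      -- evaluate one outer step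
      have hgj : PySem.List.pyGetD (tp ++ ((x :: xs) ++ ts)) ((tp.length : Nat) : Int) 0 = x := by
        have : tp ++ ((x :: xs) ++ ts) = tp ++ x :: (xs ++ ts) := by simp
        rw [this, pyGetD_at]
      have hinner : (PySem.List.pyRange ((tp.length : Nat) : Int) N 1).foldl
          (pvStep cmp ((tp.length : Nat) : Int)) (x, tp ++ ((x :: xs) ++ ts))
          = ((selR cmp x xs).1, tp ++ (selR cmp x xs).1 :: ((selR cmp x xs).2 ++ ts)) := by
        rw [hN, PySem.List.pyRange_one_cons (by push_cast [List.length_cons]; omega),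
          List.foldl_cons]
        have hfirst : pvStep cmp ((tp.length : Nat) : Int) (x, tp ++ ((x :: xs) ++ ts))
            ((tp.length : Nat) : Int) = (x, tp ++ ((x :: xs) ++ ts)) := by
          simp only [pvStep, hgj, hcmp, Bool.false_eq_true, if_false]
        rw [hfirst]
        have h1 : ((tp.length : Nat) : Int) + 1 = ((tp.length + 1 + ([] : List Int).length : Nat) : Int) := by
          push_cast [List.length_nil]; omega
        have h2 : ((tp.length + (x :: xs).length : Nat) : Int)
            = ((tp.length + 1 + ([] : List Int).length + xs.length : Nat) : Int) := by
          push_cast [List.length_cons, List.length_nil]; omega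
        have h3 : tp ++ ((x :: xs) ++ ts) = tp ++ x :: (([] : List Int) ++ (xs ++ ts)) := by simp
        rw [h1, h2, h3, innerBridge cmp xs [] tp ts x]
        simp
      have houter : pvOuter cmp N (mdone ++ z :: zr, tp ++ ((x :: xs) ++ ts)) ((tp.length : Nat) : Int)
          = ((mdone ++ [(selR cmp x xs).1]) ++ zr,
             (tp ++ [(selR cmp x xs).1]) ++ ((selR cmp x xs).2 ++ ts)) := by
        simp only [pvOuter, hgj, hinner]
        have : (mdone ++ z :: zr) = mdone ++ z :: zr := rfl
        rw [show ((tp.length : Nat) : Int) = ((mdone.length : Nat) : Int) by rw [hlen]]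
        rw [pySetD_at]
        simp
      rw [houter]
      have h1 : ((tp.length : Nat) : Int) + 1 = (((tp ++ [(selR cmp x xs).1]).length : Nat) : Int) := by
        push_cast [List.length_append, List.length_cons, List.length_nil]; omega
      have h2 : ((tp.length + (k + 1) : Nat) : Int)
          = (((tp ++ [(selR cmp x xs).1]).length + k : Nat) : Int) := by
        push_cast [List.length_append, List.length_cons, List.length_nil]; omega
      rw [h1, h2, ih (selR cmp x xs).2 ts (tp ++ [(selR cmp x xs).1]) (mdone ++ [(selR cmp x xs).1]) zr
        (by simp [hlen]) (by rw [selR_length]; omega) (by omega)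
        (by rw [hN]; push_cast [List.length_append, List.length_cons, List.length_nil, selR_length]; omega)]
      simp [selLoop]

def srt (xs : List Int) : List Int := PySem.List.sorted xs (fun x => x) false

theorem selR_perm (cmp : Int → Int → Bool) (lm : Int) (xs : List Int) :
    ((selR cmp lm xs).1 :: (selR cmp lm xs).2).Perm (lm :: xs) := by
  induction xs generalizing lm with
  | nil => simp [selR]
  | cons x xs ih =>
    by_cases h : cmp x lm <;> simp only [selR, h, if_true]
    · exact (List.Perm.swap _ _ _).trans ((ih x).cons lm)
    · exact ((List.Perm.swap _ _ _).trans ((ih lm).cons x)).trans (List.Perm.swap _ _ _)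

theorem selR_min (lm : Int) (xs : List Int) :
    ∀ y ∈ lm :: xs, (selR (fun a b => decide (a < b)) lm xs).1 ≤ y := by
  induction xs generalizing lm with
  | nil => simp [selR]
  | cons x xs ih =>
    intro y hy
    simp only [List.mem_cons] at hy
    by_cases h : (x < lm) <;>
      simp only [selR, h, decide_true, decide_false, if_true]
    · have hx : (selR (fun a b => decide (a < b)) x xs).1 ≤ x := ih x x (by simp)
      rcases hy with rfl | rfl | hy
      · exact le_trans hx (le_of_lt h)
      · exact hx
      · exact ih x y (by simp [hy])
    · have hl : (selR (fun a b => decide (a < b)) lm xs).1 ≤ lm := ih lm lm (by simp)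
      rcases hy with rfl | rfl | hy
      · exact hl
      · exact le_trans hl (le_of_not_gt h)
      · exact ih lm y (by simp [hy])

theorem selR_max (lm : Int) (xs : List Int) :
    ∀ y ∈ lm :: xs, y ≤ (selR (fun a b => decide (b < a)) lm xs).1 := by
  induction xs generalizing lm with
  | nil => simp [selR]
  | cons x xs ih =>
    intro y hy
    simp only [List.mem_cons] at hy
    by_cases h : (lm < x) <;>
      simp only [selR, h, decide_true, decide_false, if_true]
    · have hx : x ≤ (selR (fun a b => decide (b < a)) x xs).1 := ih x x (by simp)
      rcases hy with rfl | rfl | hy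
      · exact le_trans (le_of_lt h) hx
      · exact hx
      · exact ih x y (by simp [hy])
    · have hl : lm ≤ (selR (fun a b => decide (b < a)) lm xs).1 := ih lm lm (by simp)
      rcases hy with rfl | rfl | hy
      · exact hl
      · exact le_trans (le_of_not_gt h) hl
      · exact ih lm y (by simp [hy])

theorem srt_cons_min (m x : Int) (ys xs : List Int) (hp : (m :: ys).Perm (x :: xs))
    (hm : ∀ y ∈ x :: xs, m ≤ y) : srt (x :: xs) = m :: srt ys := by
  unfold srt
  apply PySem.List.sorted_id_eq_of_perm_of_pairwise
  · exact ((PySem.List.sorted_perm ys (fun x => x) false).cons m).trans hp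
  · rw [List.pairwise_cons]
    refine ⟨fun b hb => ?_, by simpa using PySem.List.sorted_pairwise ys (fun x => x)⟩
    have hb' : b ∈ m :: ys := List.mem_cons_of_mem m ((PySem.List.mem_sorted ys (fun x => x) false b).1 hb)
    exact hm b (hp.mem_iff.mp hb')

theorem srt_append_max (m x : Int) (ys xs : List Int) (hp : (m :: ys).Perm (x :: xs))
    (hm : ∀ y ∈ x :: xs, y ≤ m) : srt (x :: xs) = srt ys ++ [m] := by
  unfold srt
  apply PySem.List.sorted_id_eq_of_perm_of_pairwise
  · exact (List.perm_append_singleton m _).trans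
      (((PySem.List.sorted_perm ys (fun x => x) false).cons m).trans hp)
  · rw [List.pairwise_append]
    refine ⟨by simpa using PySem.List.sorted_pairwise ys (fun x => x), by simp, ?_⟩
    intro a ha b hb
    have hb' : b = m := by simpa using hb
    have ha' : a ∈ m :: ys := List.mem_cons_of_mem m ((PySem.List.mem_sorted ys (fun x => x) false a).1 ha)
    rw [hb']
    exact hm a (hp.mem_iff.mp ha')

theorem selLoop_len1 (cmp : Int → Int → Bool) (k : Nat) :
    ∀ rest : List Int, k ≤ rest.length → (selLoop cmp k rest).1.length = k := by
  induction k with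
  | zero => intro rest h; simp [selLoop]
  | succ k ih =>
    intro rest h
    match rest, h with
    | x :: xs, h =>
      simp only [selLoop, List.length_cons]
      rw [ih _ (by rw [selR_length]; simpa using h)]

theorem selLoop_len2 (cmp : Int → Int → Bool) (k : Nat) :
    ∀ rest : List Int, k ≤ rest.length → (selLoop cmp k rest).2.length = rest.length - k := by
  induction k with
  | zero => intro rest h; simp [selLoop]
  | succ k ih =>
    intro rest h
    match rest, h with
    | x :: xs, h =>
      simp only [selLoop, List.length_cons]
      rw [ih _ (by rw [selR_length]; simpa using h), selR_length]
      simp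

theorem ascCorrect (k : Nat) : ∀ (rest : List Int), k ≤ rest.length →
    (selLoop (fun a b => decide (a < b)) k rest).1 = (srt rest).take k ∧
    (selLoop (fun a b => decide (a < b)) k rest).2.Perm ((srt rest).drop k) := by
  induction k with
  | zero =>
    intro rest h
    constructor
    · simp [selLoop]
    · simp only [selLoop, List.drop_zero]
      exact ((PySem.List.sorted_perm rest (fun x => x) false).symm)
  | succ k ih =>
    intro rest h
    match rest, h with
    | x :: xs, h =>
      have hsrt : srt (x :: xs) = (selR (fun a b => decide (a < b)) x xs).1 ::
          srt (selR (fun a b => decide (a < b)) x xs).2 :=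
        srt_cons_min _ x _ xs (selR_perm _ x xs) (fun y hy => selR_min x xs y hy)
      have hk : k ≤ (selR (fun a b => decide (a < b)) x xs).2.length := by
        rw [selR_length]; simpa using h
      obtain ⟨ih1, ih2⟩ := ih _ hk
      constructor
      · simp only [selLoop, hsrt, List.take_succ_cons, ih1]
      · simp only [selLoop, hsrt, List.drop_succ_cons]
        exact ih2

theorem descCorrect (n : Nat) : ∀ (rest : List Int), rest.length = n →
    (selLoop (fun a b => decide (b < a)) n rest).1 = (srt rest).reverse := by
  induction n with
  | zero =>
    intro rest h
    rw [List.length_eq_zero_iff.mp h]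
    simp [selLoop, srt, PySem.List.sorted]
  | succ n ih =>
    intro rest h
    match rest, h with
    | x :: xs, h =>
      have hsrt : srt (x :: xs) = srt (selR (fun a b => decide (b < a)) x xs).2 ++
          [(selR (fun a b => decide (b < a)) x xs).1] :=
        srt_append_max _ x _ xs (selR_perm _ x xs) (fun y hy => selR_max x xs y hy)
      simp only [selLoop, hsrt, List.reverse_append, List.reverse_cons, List.reverse_nil,
        List.nil_append, List.singleton_append, List.cons.injEq]
      exact ⟨trivial, ih _ (by rw [selR_length]; simpa using h)⟩

theorem pvMinStep_eq (j : Int) : pvMinStep j = pvStep (fun a b => decide (a < b)) j := by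
  funext st i
  by_cases h : PySem.List.pyGetD st.2 i 0 < st.1 <;> simp [pvMinStep, pvStep, h]

theorem pvMaxStep_eq (j : Int) : pvMaxStep j = pvStep (fun a b => decide (b < a)) j := by
  funext st i
  by_cases h : st.1 < PySem.List.pyGetD st.2 i 0 <;> simp [pvMaxStep, pvStep, h]

theorem pvOuterMin_eq (N : Int) : pvOuterMin N = pvOuter (fun a b => decide (a < b)) N := by
  funext st j
  simp only [pvOuterMin, pvOuter, pvMinStep_eq]

theorem pvOuterMax_eq (N : Int) : pvOuterMax N = pvOuter (fun a b => decide (b < a)) N := by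
  funext st j
  simp only [pvOuterMax, pvOuter, pvMaxStep_eq]

-- ===== VERDICT (by name: the statement is the Claim_ definition above) =====
theorem tdiv_eq_ediv_nn (N : Int) (h : 1 ≤ N) :
    PySem.Int.truncdiv (N - 1) 2 = (N - 1) / 2 := by
  show Int.tdiv (N - 1) 2 = (N - 1) / 2
  exact Int.tdiv_eq_ediv_of_nonneg (by omega)

theorem MadMax_spec : Claim_equal_MadMax := by
  intro N tele _hdom hpre
  unfold Spec_MadMax
  by_cases hN : N ≤ 0
  · -- both sides are []
    have hmid1 : PySem.Int.truncdiv (N - 1) 2 ≤ 0 ∧ N ≤ PySem.Int.truncdiv (N - 1) 2 := by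
      have h0 : PySem.Int.truncdiv (N - 1) 2 = -((1 - N) / 2) := by
        show Int.tdiv (N - 1) 2 = -((1 - N) / 2)
        rw [show (N - 1) = -(1 - N) by ring, Int.neg_tdiv, Int.tdiv_eq_ediv_of_nonneg (by omega)]
      have h1 : 0 ≤ (1 - N) / 2 := Int.ediv_nonneg (by omega) (by omega)
      have hq := Int.mul_ediv_add_emod (1 - N) 2
      have hr1 : 0 ≤ (1 - N) % 2 := Int.emod_nonneg _ (by omega)
      have hr2 : (1 - N) % 2 < 2 := Int.emod_lt_of_pos _ (by omega)
      omega
    simp only [MadMax, MadMax_alt, if_pos hN]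
    rw [PySem.List.pyRange_one_eq_nil hmid1.1, PySem.List.pyRange_one_eq_nil hmid1.2]
    simp [Int.toNat_of_nonpos hN]
  · push Not at hN
    have hNlen : N ≤ (tele.length : Int) := hpre.resolve_right (by omega)
    have hn0 : (N.toNat : Int) = N := Int.toNat_of_nonneg (by omega)
    set n0 := N.toNat with hn0def
    have hlen : n0 ≤ tele.length := by omega
    have hmid : PySem.Int.truncdiv (N - 1) 2 = (N - 1) / 2 := tdiv_eq_ediv_nn N (by omega)
    have hk : (((N - 1) / 2).toNat : Int) = (N - 1) / 2 :=
      Int.toNat_of_nonneg (Int.ediv_nonneg (by omega) (by omega))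
    set k := ((N - 1) / 2).toNat with hkdef
    have hkn : k < n0 := by
      have h1 : (N - 1) / 2 ≤ N - 1 := Int.ediv_le_self _ (by omega)
      omega
    have hr0 : (tele.take n0).length = n0 := by rw [List.length_take]; omega
    have hP1 := outerBridge (fun a b => decide (a < b)) (by intro a; simp) N k
      (tele.take n0) (tele.drop n0) [] [] (List.replicate n0 (0 : Int))
      (by simp) (by rw [hr0]; exact hkn.le) (by simp; exact hkn.le) (by simp [hr0, hn0])
    simp only [List.length_nil, Nat.zero_add, Nat.cast_zero, List.nil_append,
      List.take_append_drop] at hP1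
    set asc := (selLoop (fun a b => decide (a < b)) k (tele.take n0)).1 with hascdef
    set rest1 := (selLoop (fun a b => decide (a < b)) k (tele.take n0)).2 with hrest1def
    have hasc : asc.length = k := selLoop_len1 _ _ _ (by omega)
    have hrest1 : rest1.length = n0 - k := by
      rw [hrest1def, selLoop_len2 _ _ _ (by omega), hr0]
    have hP2 := outerBridge (fun a b => decide (b < a)) (by intro a; simp) N (n0 - k)
      rest1 (tele.drop n0) asc asc (List.replicate (n0 - k) (0 : Int))
      rfl (by omega) (by simp) (by simp [hasc, hrest1]; omega)
    rw [hasc, show k + (n0 - k) = n0 from by omega, hn0] at hP2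
    -- evaluate port A
    simp only [MadMax, hmid, ← hk, ← hn0def, pvOuterMin_eq, pvOuterMax_eq]
    rw [hP1]
    rw [List.drop_replicate] at hP2 ⊢
    rw [hP2]
    -- evaluate port B
    simp only [MadMax_alt, if_neg (by omega : ¬ N ≤ 0),
      PySem.Int.floordiv_eq_ediv_of_pos (by omega : (0:Int) < 2), ← hk,
      PySem.List.slice_to tele (by omega : (0:Int) ≤ N), ← hn0def,
      PySem.List.slice_to_natCast, PySem.List.slice_from_natCast,
      PySem.List.slice?_none_none_neg_one, Option.getD_some]
    -- combine the order facts
    have hA1 : asc = (srt (tele.take n0)).take k := (ascCorrect k (tele.take n0) (by omega)).1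
    have hperm : rest1.Perm ((srt (tele.take n0)).drop k) := (ascCorrect k (tele.take n0) (by omega)).2
    have hdesc : (selLoop (fun a b => decide (b < a)) (n0 - k) rest1).1
        = (srt rest1).reverse := descCorrect (n0 - k) rest1 hrest1
    have hsrt1 : srt rest1 = (srt (tele.take n0)).drop k := by
      have h1 : srt rest1 = srt ((srt (tele.take n0)).drop k) :=
        PySem.List.sorted_eq_sorted_of_perm _ _ _ (fun a b h => h) hperm
      have h2 : ((srt (tele.take n0)).drop k).Pairwise (fun a b : Int => a ≤ b) :=
        (PySem.List.sorted_pairwise (tele.take n0) (fun x => x)).drop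
      rw [h1]
      exact PySem.List.sorted_eq_self_of_pairwise _ _ h2
    rw [hdesc, hsrt1, hA1]
    simp [srt]
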